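-- pv_equiv track=rewrite | github.com/RRisto/learning | algorithms_learn/what_can_be_computed/src/GnTn.py | GnTn
-- ===== SOURCE A (Python) =====
-- def GnTn(inString):
--     length = len(inString)
--     # length must be even
--     if length % 2 != 0: return 'no'
--     # split into first half and second half of input
--     firstHalf = inString[:length//2]
--     secondHalf = inString[length//2:]
--     # firstHalf must contain all Gs
--     for x in firstHalf:
--         if x != 'G': return 'no'
--     # secondHalf must contain all Ts
--     for x in secondHalf:
--         if x != 'T': return 'no'
--     return 'yes'
-- ===== SOURCE B (Python) =====
-- def GnTn(inString):
--     n = len(inString) // 2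
--     return 'yes' if inString == 'G' * n + 'T' * n else 'no'
-- ===== Notes on version B (the rewrite author's own statement) =====
-- stated objective: simpler
-- what changed: Replaces the even-length guard plus two per-character scanning loops with a single equality comparison of the input against the constructed canonical string of n Gs followed by n Ts, where n is half the length.
import Mathlib
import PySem

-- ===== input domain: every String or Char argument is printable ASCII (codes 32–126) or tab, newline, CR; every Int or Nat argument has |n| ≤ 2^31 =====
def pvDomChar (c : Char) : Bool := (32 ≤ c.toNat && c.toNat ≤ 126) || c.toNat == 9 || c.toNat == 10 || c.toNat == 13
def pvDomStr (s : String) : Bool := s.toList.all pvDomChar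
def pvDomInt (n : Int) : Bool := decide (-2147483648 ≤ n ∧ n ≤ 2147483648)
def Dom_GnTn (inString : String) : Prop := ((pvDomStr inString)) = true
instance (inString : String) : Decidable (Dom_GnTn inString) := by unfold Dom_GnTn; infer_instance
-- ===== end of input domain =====

-- B builds the canonical string of n Gs then n Ts (n = half the length) and compares it with the input, replacing A's even-length guard and two scanning loops (objective: simpler).


-- ===== PORT A =====
-- loop "for x in secondHalf: if x != 'T': return 'no'" then "return 'yes'"
def GnTn_loopT : List Char → String
  | [] => "yes"
  | x :: rest => if x ≠ 'T' then "no" else GnTn_loopT rest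

-- loop "for x in firstHalf: if x != 'G': return 'no'", falling through to the T loop
def GnTn_loopG (secondHalf : List Char) : List Char → String
  | [] => GnTn_loopT secondHalf
  | x :: rest => if x ≠ 'G' then "no" else GnTn_loopG secondHalf rest

def GnTn (inString : String) : String :=
  let length : Int := (inString.toList.length : Int)
  if length % 2 ≠ 0 then "no"
  else
    -- inString[:length//2] / inString[length//2:]: length//2 ≥ 0, so the slices are exactly take/drop
    let n := (PySem.Int.floordiv length 2).toNat
    let firstHalf := inString.toList.take n
    let secondHalf := inString.toList.drop n
    GnTn_loopG secondHalf firstHalf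

-- ===== PORT B =====
def GnTn_alt (inString : String) : String :=
  let n := inString.toList.length / 2
  if inString.toList = List.replicate n 'G' ++ List.replicate n 'T' then "yes" else "no"

-- ===== PRECONDITION & SPEC =====
def Spec_GnTn (inString : String) (out : String) : Prop := out = GnTn_alt inString
instance (inString : String) (out : String) : Decidable (Spec_GnTn inString out) := by unfold Spec_GnTn; infer_instance

-- ===== CLAIM (what is proved, stated in full; the proofs are below) =====
def Claim_equal_GnTn : Prop := ∀ (inString : String), Dom_GnTn inString → Spec_GnTn inString (GnTn inString)

-- ===== LEMMAS AND PROOFS =====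

theorem loopT_eq (l : List Char) :
    GnTn_loopT l = if l = List.replicate l.length 'T' then "yes" else "no" := by
  induction l with
  | nil => simp [GnTn_loopT]
  | cons x rest ih =>
    simp only [GnTn_loopT, ih, List.length_cons, List.replicate_succ]
    by_cases hx : x = 'T'
    · subst hx
      rw [if_neg (by simp)]
      by_cases hr : rest = List.replicate rest.length 'T'
      · rw [if_pos hr, if_pos (by rw [← hr])]
      · rw [if_neg hr, if_neg (fun h => hr (List.cons.injEq .. ▸ h).2)]
    · rw [if_pos hx, if_neg (fun h => hx (List.cons.injEq .. ▸ h).1)]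

theorem loopG_eq (s l : List Char) :
    GnTn_loopG s l =
      if l = List.replicate l.length 'G' then GnTn_loopT s else "no" := by
  induction l with
  | nil => simp [GnTn_loopG]
  | cons x rest ih =>
    simp only [GnTn_loopG, ih, List.length_cons, List.replicate_succ]
    by_cases hx : x = 'G'
    · subst hx
      rw [if_neg (by simp)]
      by_cases hr : rest = List.replicate rest.length 'G'
      · rw [if_pos hr, if_pos (by rw [← hr])]
      · rw [if_neg hr, if_neg (fun h => hr (List.cons.injEq .. ▸ h).2)]
    · rw [if_pos hx, if_neg (fun h => hx (List.cons.injEq .. ▸ h).1)]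

theorem GnTn_eq_alt (s : String) : GnTn s = GnTn_alt s := by
  unfold GnTn GnTn_alt
  simp only []
  generalize s.toList = l
  by_cases hodd : (l.length : Int) % 2 ≠ 0
  · rw [if_pos hodd]
    have hne : l ≠ List.replicate (l.length / 2) 'G' ++ List.replicate (l.length / 2) 'T' := by
      intro h
      have hlen := congrArg List.length h
      simp only [List.length_append, List.length_replicate] at hlen
      omega
    rw [if_neg hne]
  · rw [if_neg hodd]
    have hfd : (PySem.Int.floordiv (l.length : Int) 2).toNat = l.length / 2 := by
      rw [PySem.Int.floordiv_eq_ediv_of_pos (by omega)]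
      omega
    rw [hfd]
    obtain ⟨m, hm⟩ : ∃ m, l.length = 2 * m := ⟨l.length / 2, by omega⟩
    have h2 : l.length / 2 = m := by omega
    rw [h2]
    have hsplit : l.take m ++ l.drop m = l := List.take_append_drop _ _
    have hlt : (l.take m).length = m := by simp [List.length_take]; omega
    have hld : (l.drop m).length = m := by simp [List.length_drop]; omega
    rw [loopG_eq, loopT_eq, hlt, hld]
    by_cases hg : l.take m = List.replicate m 'G'
    · by_cases ht : l.drop m = List.replicate m 'T'
      · rw [if_pos hg, if_pos ht, if_pos (by rw [← hsplit, hg, ht])]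
      · rw [if_pos hg, if_neg ht,
          if_neg (fun h => ht (List.append_inj (hsplit.trans h) (hlt.trans (by simp))).2)]
    · rw [if_neg hg,
        if_neg (fun h => hg (List.append_inj (hsplit.trans h) (hlt.trans (by simp))).1)]

-- ===== VERDICT (by name: the statement is the Claim_ definition above) =====
theorem GnTn_spec : Claim_equal_GnTn := by
  intro s _
  exact GnTn_eq_alt s
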